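-- pv_equiv track=rewrite | github.com/maha0525/SAIVerse | scripts/chatlog_fix.py | parse_blocks
-- ===== SOURCE A (Python) =====
-- from typing import List
--
-- def parse_blocks(text: str) -> List[str]:
--     """'## Prompt:' または '## Response:' 行に続く本文をブロック単位で取り出す"""
--     blocks, buf = [], []
--     skip_leading_blank = True  # skip blank lines before first block content if file starts without header
--     for raw_line in text.splitlines():
--         line = raw_line.lstrip('\ufeff')  # remove BOM if present on the first line
--         if line in ('## Prompt:', '## Response:'):
--             if buf:
--                 blocks.append('\n'.join(buf).rstrip())
--                 buf = []
--             skip_leading_blank = True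
--         else:
--             if skip_leading_blank and not line.strip():
--                 continue
--             skip_leading_blank = False
--             buf.append(line)
--     if buf:
--         blocks.append('\n'.join(buf).rstrip())
--     return blocks
-- ===== SOURCE B (Python) =====
-- from typing import List
--
-- def parse_blocks(text: str) -> List[str]:
--     # Two-phase rewrite: partition the (BOM-stripped) lines into segments at
--     # header lines, then map each segment to a block (drop leading blanks,
--     # join, rstrip). Same output as the one-pass state machine.
--     lines = [raw.lstrip('\ufeff') for raw in text.splitlines()]
--     segments, cur = [], []
--     for line in lines:
--         if line in ('## Prompt:', '## Response:'):
--             segments.append(cur)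
--             cur = []
--         else:
--             cur.append(line)
--     segments.append(cur)
--     blocks = []
--     for seg in segments:
--         i = 0
--         while i < len(seg) and not seg[i].strip():
--             i += 1
--         body = seg[i:]
--         if body:
--             blocks.append('\n'.join(body).rstrip())
--     return blocks
-- ===== Notes on version B (the rewrite author's own statement) =====
-- stated objective: alternative
-- what changed: Replaces the single interleaved state machine (buf + skip_leading_blank flag) with a two-phase pipeline: partition the lines into segments at header lines, then independently map each segment to a block by dropping its leading blank lines and joining/rstripping the rest.
import Mathlib
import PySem

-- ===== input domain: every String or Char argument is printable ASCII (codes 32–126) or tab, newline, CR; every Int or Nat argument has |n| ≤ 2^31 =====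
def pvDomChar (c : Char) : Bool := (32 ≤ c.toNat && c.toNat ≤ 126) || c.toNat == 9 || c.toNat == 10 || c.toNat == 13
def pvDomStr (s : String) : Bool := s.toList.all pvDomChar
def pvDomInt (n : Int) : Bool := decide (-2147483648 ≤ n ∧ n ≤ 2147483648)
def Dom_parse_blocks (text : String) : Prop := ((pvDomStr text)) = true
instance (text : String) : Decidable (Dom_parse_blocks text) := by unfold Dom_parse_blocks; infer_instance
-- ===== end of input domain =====

-- B replaces A's interleaved state machine (buf + skip-blank flag) with a partition-into-segments
-- pass followed by a per-segment mapping pass; same return value (alternative decomposition, not faster).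

-- shared tiny helpers of both ports (both Pythons strip the BOM per line, emit '\n'.join(..).rstrip())
-- line.lstrip('\ufeff'): drops exactly the leading U+FEFF chars — exact hand port (no PySem lstrip-with-chars)
def pvBOMstrip (s : String) : String := String.ofList (s.toList.dropWhile (fun c => c = '\ufeff'))
def pvEmit (buf : List String) : String := PySem.Str.rstrip (PySem.Str.join "\n" buf)

-- ===== PORT A =====
-- loop body of A, on the already BOM-stripped line; state (blocks, buf, skip_leading_blank)
def pvStepA (st : List String × List String × Bool) (line : String) : List String × List String × Bool :=
  if line = "## Prompt:" ∨ line = "## Response:" then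
    (if st.2.1 ≠ [] then st.1 ++ [pvEmit st.2.1] else st.1, [], true)
  else if st.2.2 = true ∧ PySem.Str.strip line = "" then st
  else (st.1, st.2.1 ++ [line], false)

def parse_blocks (text : String) : List String :=
  let st := (PySem.Str.splitlines text).foldl (fun st raw => pvStepA st (pvBOMstrip raw)) ([], [], true)
  if st.2.1 ≠ [] then st.1 ++ [pvEmit st.2.1] else st.1

-- ===== PORT B =====
-- first loop of B: split the line list into segments at header lines; state (segments, cur)
def pvStepSeg (st : List (List String) × List String) (line : String) : List (List String) × List String :=
  if line = "## Prompt:" ∨ line = "## Response:" then (st.1 ++ [st.2], [])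
  else (st.1, st.2 ++ [line])

-- second loop of B, per segment: drop leading blank lines (the index while-loop = dropWhile), emit if nonempty
def pvSegOut (seg : List String) : List String :=
  let body := seg.dropWhile (fun l => PySem.Str.strip l == "")
  if body ≠ [] then [pvEmit body] else []

def parse_blocks_alt (text : String) : List String :=
  let lines := (PySem.Str.splitlines text).map pvBOMstrip
  let st := lines.foldl pvStepSeg ([], [])
  let segments := st.1 ++ [st.2]
  segments.foldl (fun acc seg => acc ++ pvSegOut seg) []

-- ===== PRECONDITION & SPEC =====
def Spec_parse_blocks (text : String) (out : List String) : Prop := out = parse_blocks_alt text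
instance (text : String) (out : List String) : Decidable (Spec_parse_blocks text out) := by unfold Spec_parse_blocks; infer_instance

-- ===== CLAIM (what is proved, stated in full; the proofs are below) =====
def Claim_equal_parse_blocks : Prop := ∀ (text : String), Dom_parse_blocks text → Spec_parse_blocks text (parse_blocks text)

-- ===== LEMMAS AND PROOFS =====

-- A's fold, unrolled as a recursion over the lines with pending buffer `buf` (incl. the final flush)
def pvProcFrom : List String → List String → List String
  | buf, [] => if buf ≠ [] then [pvEmit buf] else []
  | buf, l :: ls =>
    if l = "## Prompt:" ∨ l = "## Response:" then
      (if buf ≠ [] then pvEmit buf :: pvProcFrom [] ls else pvProcFrom [] ls)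
    else if buf = [] ∧ PySem.Str.strip l = "" then pvProcFrom [] ls
    else pvProcFrom (buf ++ [l]) ls

-- B's segment list, as a recursion over the lines
def pvConsHd (cur : List String) : List (List String) → List (List String)
  | [] => [cur]
  | h :: t => (cur ++ h) :: t

def pvSegsR : List String → List (List String)
  | [] => [[]]
  | l :: ls => if l = "## Prompt:" ∨ l = "## Response:" then [] :: pvSegsR ls
               else pvConsHd [l] (pvSegsR ls)

-- B's output given segments, with a pending prefix `buf` glued (without blank-dropping) onto the first segment
def pvOutWith (buf : List String) : List (List String) → List String
  | [] => []
  | s :: rest => (if buf = [] then pvSegOut s else [pvEmit (buf ++ s)]) ++ rest.flatMap pvSegOut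

def pvFinishA (st : List String × List String × Bool) : List String :=
  if st.2.1 ≠ [] then st.1 ++ [pvEmit st.2.1] else st.1

theorem pvSegsR_exists_cons (ls : List String) : ∃ h t, pvSegsR ls = h :: t := by
  cases ls with
  | nil => exact ⟨[], [], rfl⟩
  | cons l ls =>
    simp only [pvSegsR]
    split
    · exact ⟨_, _, rfl⟩
    · rcases h : pvSegsR ls with _ | ⟨h', t'⟩ <;> simp [pvConsHd]

theorem pvSegOut_nil : pvSegOut [] = [] := rfl

theorem pvSegOut_cons_blank {l : String} (hl : PySem.Str.strip l = "") (h : List String) :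
    pvSegOut (l :: h) = pvSegOut h := by
  have hb : (PySem.Str.strip l == "") = true := beq_iff_eq.mpr hl
  simp [pvSegOut, List.dropWhile, hb]

theorem pvSegOut_cons_nonblank {l : String} (hl : ¬ PySem.Str.strip l = "") (h : List String) :
    pvSegOut (l :: h) = [pvEmit (l :: h)] := by
  have hb : (PySem.Str.strip l == "") = false := beq_eq_false_iff_ne.mpr hl
  simp [pvSegOut, List.dropWhile, hb]

-- A's fold equals pvProcFrom (induction over the lines, generalizing the accumulated state)
theorem pvLemA (ls : List String) : ∀ (blocks buf : List String),
    pvFinishA (ls.foldl pvStepA (blocks, buf, buf.isEmpty)) = blocks ++ pvProcFrom buf ls := by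
  induction ls with
  | nil =>
    intro blocks buf
    by_cases h : buf = [] <;> simp [pvFinishA, pvProcFrom, h]
  | cons l ls ih =>
    intro blocks buf
    rw [List.foldl_cons]
    by_cases hh : l = "## Prompt:" ∨ l = "## Response:"
    · have hstep : pvStepA (blocks, buf, buf.isEmpty) l
          = (if buf ≠ [] then blocks ++ [pvEmit buf] else blocks, [], ([] : List String).isEmpty) := by
        simp [pvStepA, hh]
      rw [hstep, ih]
      by_cases hb : buf = [] <;> simp [pvProcFrom, hh, hb]
    · by_cases hb : buf.isEmpty = true ∧ PySem.Str.strip l = ""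
      · have hbuf : buf = [] := List.isEmpty_iff.mp hb.1
        have hstep : pvStepA (blocks, buf, buf.isEmpty) l = (blocks, buf, buf.isEmpty) := by
          simp [pvStepA, hh, hb.1, hb.2]
        rw [hstep, hbuf] at *
        rw [ih]
        simp [pvProcFrom, hh, hb.2]
      · have hstep : pvStepA (blocks, buf, buf.isEmpty) l
            = (blocks, buf ++ [l], (buf ++ [l]).isEmpty) := by
          simp only [pvStepA, if_neg hh]
          rw [if_neg hb]
          simp
        rw [hstep, ih]
        have hcond : ¬ (buf = [] ∧ PySem.Str.strip l = "") := by
          intro ⟨h1, h2⟩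
          exact hb ⟨List.isEmpty_iff.mpr h1, h2⟩
        simp only [pvProcFrom, if_neg hh, if_neg hcond]

-- B's first fold equals pvSegsR (with the pending current segment glued onto the head)
theorem pvLemSeg (ls : List String) : ∀ (segs : List (List String)) (cur : List String),
    (ls.foldl pvStepSeg (segs, cur)).1 ++ [(ls.foldl pvStepSeg (segs, cur)).2]
      = segs ++ pvConsHd cur (pvSegsR ls) := by
  induction ls with
  | nil => intro segs cur; simp [pvSegsR, pvConsHd]
  | cons l ls ih =>
    intro segs cur
    rw [List.foldl_cons]
    obtain ⟨h, t, hst⟩ := pvSegsR_exists_cons ls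
    by_cases hh : l = "## Prompt:" ∨ l = "## Response:"
    · have : pvStepSeg (segs, cur) l = (segs ++ [cur], []) := by simp [pvStepSeg, hh]
      rw [this, ih]
      simp [pvSegsR, hh, hst, pvConsHd]
    · have : pvStepSeg (segs, cur) l = (segs, cur ++ [l]) := by simp [pvStepSeg, hh]
      rw [this, ih]
      simp [pvSegsR, hh, hst, pvConsHd]

-- pvProcFrom equals B's per-segment mapping over pvSegsR
theorem pvLemB2 (ls : List String) : ∀ (buf : List String),
    pvProcFrom buf ls = pvOutWith buf (pvSegsR ls) := by
  induction ls with
  | nil =>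
    intro buf
    by_cases h : buf = [] <;> simp [pvProcFrom, pvSegsR, pvOutWith, pvSegOut, h]
  | cons l ls ih =>
    intro buf
    obtain ⟨h, t, hst⟩ := pvSegsR_exists_cons ls
    by_cases hh : l = "## Prompt:" ∨ l = "## Response:"
    · simp only [pvProcFrom, if_pos hh, pvSegsR, ih, hst, pvOutWith]
      by_cases hb : buf = [] <;> simp [hb, pvSegOut_nil, List.flatMap_cons]
    · by_cases hbl : buf = [] ∧ PySem.Str.strip l = ""
      · obtain ⟨hb, hs⟩ := hbl
        subst hb
        simp [pvProcFrom, hh, hs, ih, hst, pvSegsR, pvConsHd, pvOutWith,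
          pvSegOut_cons_blank hs]
      · simp only [pvProcFrom, if_neg hh, if_neg hbl, ih, hst, pvSegsR, pvConsHd, pvOutWith]
        by_cases hb : buf = []
        · have hnb : ¬ PySem.Str.strip l = "" := fun hs => hbl ⟨hb, hs⟩
          simp [hb, pvSegOut_cons_nonblank hnb]
        · have hne : buf ++ [l] ≠ [] := by simp
          simp [hb, hne]

-- ===== VERDICT (by name: the statement is the Claim_ definition above) =====
theorem parse_blocks_spec : Claim_equal_parse_blocks := by
  intro text _
  show parse_blocks text = parse_blocks_alt text
  have hA : parse_blocks text
      = pvFinishA (((PySem.Str.splitlines text).map pvBOMstrip).foldl pvStepA ([], [], true)) := by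
    simp only [parse_blocks, pvFinishA, List.foldl_map]
  obtain ⟨h, t, hst⟩ := pvSegsR_exists_cons ((PySem.Str.splitlines text).map pvBOMstrip)
  have hS := pvLemSeg ((PySem.Str.splitlines text).map pvBOMstrip) [] []
  rw [hst] at hS
  simp only [pvConsHd, List.nil_append] at hS
  have hB : parse_blocks_alt text
      = (pvSegsR ((PySem.Str.splitlines text).map pvBOMstrip)).flatMap pvSegOut := by
    simp only [parse_blocks_alt]
    rw [hS, hst, PySem.List.foldl_append_eq_flatMap]
    simp
  have hPA := pvLemA ((PySem.Str.splitlines text).map pvBOMstrip) [] []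
  simp only [List.isEmpty_nil, List.nil_append] at hPA
  rw [hA, hPA, pvLemB2, hst, hB, hst]
  simp [pvOutWith, List.flatMap_cons]
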